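-- pv_equiv track=rewrite | github.com/xdu-mle/advent_of_code_2023 | day_14/run2.py | evaluate
-- ===== SOURCE A (Python) =====
-- def evaluate(arr):
--     res = 0
--     m, n = len(arr), len(arr[0])
--     for row in range(m):
--         for col in range(n):
--             if arr[row][col] == 'O':
--                 res += (m-row)
--     return res
-- ===== SOURCE B (Python) =====
-- def evaluate(arr):
--     n = len(arr[0])
--     # stage 1: per-row counts of 'O' (over the first n columns)
--     counts = [sum(1 for col in range(n) if row[col] == 'O') for row in arr]
--     # stage 2: prefix-sum accumulation -- no per-cell weights anywhere
--     running = 0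
--     res = 0
--     for c in counts:
--         running += c
--         res += running
--     return res
-- ===== Notes on version B (the rewrite author's own statement) =====
-- stated objective: alternative
-- what changed: Replaces A's per-cell distance-to-bottom weighting (res += m-row inside nested loops) by two staged passes: first build a list of per-row 'O' counts, then accumulate a running prefix sum of those counts and sum the prefixes, which never computes any weight m-row.
import Mathlib
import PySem

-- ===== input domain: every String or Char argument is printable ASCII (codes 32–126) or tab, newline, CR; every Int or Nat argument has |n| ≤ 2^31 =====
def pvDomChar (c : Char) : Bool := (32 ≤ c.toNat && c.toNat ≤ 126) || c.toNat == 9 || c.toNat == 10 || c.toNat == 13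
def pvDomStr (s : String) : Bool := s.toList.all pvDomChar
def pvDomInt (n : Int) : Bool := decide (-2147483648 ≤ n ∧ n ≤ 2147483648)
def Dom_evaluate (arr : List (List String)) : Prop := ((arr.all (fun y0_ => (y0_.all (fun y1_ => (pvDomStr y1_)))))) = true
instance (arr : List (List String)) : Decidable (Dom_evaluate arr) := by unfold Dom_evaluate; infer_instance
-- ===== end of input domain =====

-- B replaces A's per-cell distance-to-bottom weighting by two staged passes: a list of
-- per-row 'O' counts, then a running-prefix-sum accumulation (objective: alternative).


-- ===== PORT A =====
def evaluate (arr : List (List String)) : Int :=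
  let m : Int := arr.length
  let n : Int := (PySem.List.pyGetD arr 0 []).length
  (PySem.List.pyRange 0 m 1).foldl (fun res row =>
    (PySem.List.pyRange 0 n 1).foldl (fun res col =>
      if PySem.List.pyGetD (PySem.List.pyGetD arr row []) col "" == "O" then res + (m - row)
      else res) res) 0

-- ===== PORT B =====
def evaluate_alt (arr : List (List String)) : Int :=
  let n : Int := (PySem.List.pyGetD arr 0 []).length
  let counts : List Int := arr.map (fun row =>
    (PySem.List.pyRange 0 n 1).foldl
      (fun s col => if PySem.List.pyGetD row col "" == "O" then s + 1 else s) 0)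
  (counts.foldl (fun p c => (p.1 + c, p.2 + (p.1 + c))) ((0 : Int), (0 : Int))).2

-- ===== PRECONDITION & SPEC =====
-- Pre_ excludes the inputs on which A raises IndexError: the empty grid (arr[0]) and
-- ragged grids where some row is shorter than the first row (arr[row][col]).
def Pre_evaluate (arr : List (List String)) : Prop :=
  arr ≠ [] ∧ ∀ s ∈ arr, (arr.headD []).length ≤ s.length
instance (arr : List (List String)) : Decidable (Pre_evaluate arr) := by
  unfold Pre_evaluate; infer_instance

def pvWitness_evaluate : List (List String) := [["O", "."], [".", "O"]]

def Spec_evaluate (arr : List (List String)) (out : Int) : Prop := out = evaluate_alt arr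
instance (arr : List (List String)) (out : Int) : Decidable (Spec_evaluate arr out) := by
  unfold Spec_evaluate; infer_instance

-- ===== CLAIM (what is proved, stated in full; the proofs are below) =====
def Claim_equal_evaluate : Prop :=
  ∀ (arr : List (List String)), Dom_evaluate arr → Pre_evaluate arr →
    Spec_evaluate arr (evaluate arr)

-- ===== LEMMAS AND PROOFS =====

-- weighted O-count both programs compute: wsum n [r1,…,rk] = Σ (k-i) * count of "O" in ri.take n
def wsum (n : Nat) : List (List String) → Int
  | [] => 0
  | r :: t => ((t.length : Int) + 1) * ((r.take n).count "O" : Int) + wsum n t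

lemma foldl_beq_add_const (l : List String) (v : String) (c : Int) (a : Int) :
    l.foldl (fun res x => if x == v then res + c else res) a
      = a + (l.count v : Int) * c := by
  induction l generalizing a with
  | nil => simp
  | cons x t ih =>
      simp only [List.foldl_cons]
      rcases eq_or_ne x v with h | h
      · rw [if_pos (by simp [h]), ih, h, List.count_cons_self]; push_cast; ring
      · rw [if_neg (by simp [h]), ih]; simp [List.count_cons]; left; exact h

-- A's inner column loop / B's per-row count loop over a row r (with nn ≤ r.length from Pre_)
lemma inner_eq (r : List String) (nn : Nat) (h : nn ≤ r.length) (c acc : Int) :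
    (PySem.List.pyRange 0 (nn : Int) 1).foldl
        (fun res col => if PySem.List.pyGetD r col "" == "O" then res + c else res) acc
      = acc + ((r.take nn).count "O" : Int) * c := by
  have hlen : ((r.take nn).length : Int) = (nn : Int) := by
    simp [List.length_take, Nat.min_eq_left h]
  rw [PySem.List.foldl_congr_mem _ _
        (fun res col => if PySem.List.pyGetD (r.take nn) col "" == "O" then res + c else res) acc
        (by
          intro res col hmem
          rw [PySem.List.mem_pyRange_one] at hmem
          have h1 : PySem.List.pyGetD r col "" = PySem.List.pyGetD (r.take nn) col "" := by
            rw [PySem.List.pyGetD_eq_getElem r "" hmem.1 (by exact_mod_cast lt_of_lt_of_le hmem.2 (by exact_mod_cast h)),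
                PySem.List.pyGetD_eq_getElem (r.take nn) "" hmem.1 (by rw [hlen]; exact hmem.2),
                List.getElem_take]
          rw [h1]),
      ← hlen,
      PySem.List.foldl_pyRange_zero_pyGetD' (r.take nn) ""
        (fun res x => if x == "O" then res + c else res) acc,
      foldl_beq_add_const]

-- A's outer row loop, generalized over a start index j
lemma a_outer (arr : List (List String)) (nn : Nat)
    (hn : ∀ s ∈ arr, nn ≤ s.length) :
    ∀ (k j : Nat) (acc : Int), j + k = arr.length →
      (PySem.List.pyRange (j : Int) (arr.length : Int) 1).foldl
          (fun res row =>
            (PySem.List.pyRange 0 (nn : Int) 1).foldl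
              (fun res col =>
                if PySem.List.pyGetD (PySem.List.pyGetD arr row []) col "" == "O"
                then res + ((arr.length : Int) - row) else res) res) acc
        = acc + wsum nn (arr.drop j) := by
  intro k
  induction k with
  | zero =>
      intro j acc hj
      rw [show PySem.List.pyRange (j : Int) (arr.length : Int) 1 = [] from
            PySem.List.pyRange_one_eq_nil (by omega)]
      simp [List.drop_eq_nil_of_le (by omega : arr.length ≤ j), wsum]
  | succ k ih =>
      intro j acc hj
      have hjlt : (j : Int) < (arr.length : Int) := by exact_mod_cast (by omega : j < arr.length)
      rw [show PySem.List.pyRange (j : Int) (arr.length : Int) 1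
            = (j : Int) :: PySem.List.pyRange ((j : Int) + 1) (arr.length : Int) 1 from
            PySem.List.pyRange_one_cons hjlt, List.foldl_cons]
      have hget : PySem.List.pyGetD arr (j : Int) [] = arr[j] :=
        PySem.List.pyGetD_ofNat arr j [] (by omega)
      rw [inner_eq _ nn (by rw [hget]; exact hn _ (arr.getElem_mem _)) _ acc]
      have : ((j : Int) + 1) = ((j + 1 : Nat) : Int) := by push_cast; ring
      rw [this, ih (j + 1) _ (by omega)]
      have hdrop : arr.drop j = arr[j] :: arr.drop (j + 1) :=
        List.drop_eq_getElem_cons (by omega)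
      rw [hdrop]
      simp only [wsum, hget, List.length_drop]
      push_cast [(by omega : j + 1 ≤ arr.length)]
      ring

-- weighted sum over a plain count list
def wc : List Int → Int
  | [] => 0
  | c :: t => ((t.length : Int) + 1) * c + wc t

-- B's prefix-sum pass, fully generalized over the start state
lemma b_loop (cs : List Int) (r0 a0 : Int) :
    (cs.foldl (fun p c => (p.1 + c, p.2 + (p.1 + c))) (r0, a0)).2
      = a0 + (cs.length : Int) * r0 + wc cs := by
  induction cs generalizing r0 a0 with
  | nil => simp [wc]
  | cons c t ih =>
      simp only [List.foldl_cons, ih, wc, List.length_cons]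
      push_cast
      ring

-- the weighted count-list sum is the weighted row sum
lemma wc_map (nn : Nat) (l : List (List String)) :
    wc (l.map (fun r => ((r.take nn).count "O" : Int))) = wsum nn l := by
  induction l with
  | nil => rfl
  | cons r t ih => simp [wc, wsum, ih]

-- ===== VERDICT (by name: the statement is the Claim_ definition above) =====
theorem evaluate_spec : Claim_equal_evaluate := by
  intro arr _ hpre
  obtain ⟨hne, hall⟩ := hpre
  unfold Spec_evaluate evaluate evaluate_alt
  have hhead : PySem.List.pyGetD arr 0 [] = arr.headD [] := by
    cases arr with
    | nil => exact absurd rfl hne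
    | cons r t => simp [PySem.List.pyGetD_zero_cons]
  simp only [hhead]
  have hA := a_outer arr (arr.headD []).length hall arr.length 0 0 (by omega)
  simp only [Nat.cast_zero, List.drop_zero] at hA
  rw [hA]
  have hmap : arr.map (fun row =>
      (PySem.List.pyRange 0 ((arr.headD []).length : Int) 1).foldl
        (fun s col => if PySem.List.pyGetD row col "" == "O" then s + 1 else s) 0)
      = arr.map (fun r => ((r.take (arr.headD []).length).count "O" : Int)) := by
    apply List.map_congr_left
    intro r hr
    rw [inner_eq r (arr.headD []).length (hall r hr) 1 0]
    ring
  rw [hmap, b_loop, wc_map]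
  simp
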